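-- pv_equiv track=rewrite | github.com/pypi-data/pypi-mirror-403 | packages/structly-whois/structly_whois-1.1.0-py3-none-any.whl/structly_whois/normalization.py | _extract_afnic_contact_blocks
-- ===== SOURCE A (Python) =====
-- def _extract_afnic_contact_blocks(lines: list[str]) -> dict[str, dict[str, str]]:
--     """Parse nic-hdl sections into a mapping keyed by handle."""
--     blocks: dict[str, dict[str, str]] = {}
--     idx = 0
--     total = len(lines)
--     while idx < total:
--         line = lines[idx]
--         lower = line.lower()
--         if lower.startswith("nic-hdl:"):
--             handle = line.split(":", 1)[1].strip()
--             idx += 1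
--             attrs: dict[str, str] = {}
--             while idx < total:
--                 current = lines[idx]
--                 current_lower = current.lower()
--                 if not current:
--                     idx += 1
--                     continue
--                 if current_lower.startswith("nic-hdl:"):
--                     break
--                 parts = current.split(":", 1)
--                 if len(parts) == 2:
--                     key = parts[0].strip().lower()
--                     value = parts[1].strip()
--                     attrs.setdefault(key, value)
--                 if current_lower.startswith("source:"):
--                     idx += 1
--                     break
--                 idx += 1
--             blocks[handle] = attrs
--             continue
--         idx += 1
--     return blocks
-- ===== SOURCE B (Python) =====
-- def _extract_afnic_contact_blocks(lines: list[str]) -> dict[str, dict[str, str]]: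
--     """Two-pass re-implementation: first segment the lines on nic-hdl headers
--     (a segment's body runs until a source: line, inclusive, or the next
--     nic-hdl:, exclusive), then parse each segment's body into attributes."""
--     segments = []
--     current = None
--     for line in lines:
--         low = line.lower()
--         if low.startswith("nic-hdl:"):
--             current = (line.split(":", 1)[1].strip(), [])
--             segments.append(current)
--         elif current is not None:
--             current[1].append(line)
--             if low.startswith("source:"):
--                 current = None
--     blocks = {}
--     for handle, body in segments:
--         attrs = {}
--         for raw in body:
--             parts = raw.split(":", 1)
--             if len(parts) == 2:
--                 attrs.setdefault(parts[0].strip().lower(), parts[1].strip())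
--         blocks[handle] = attrs
--     return blocks
-- ===== Notes on version B (the rewrite author's own statement) =====
-- stated objective: alternative
-- what changed: Replaced A's single index-driven nested while loop with a two-pass pipeline: one linear scan segments the lines into (handle, body-lines) segments, then a second pass parses each segment's body into an attribute dict.
import Mathlib
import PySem

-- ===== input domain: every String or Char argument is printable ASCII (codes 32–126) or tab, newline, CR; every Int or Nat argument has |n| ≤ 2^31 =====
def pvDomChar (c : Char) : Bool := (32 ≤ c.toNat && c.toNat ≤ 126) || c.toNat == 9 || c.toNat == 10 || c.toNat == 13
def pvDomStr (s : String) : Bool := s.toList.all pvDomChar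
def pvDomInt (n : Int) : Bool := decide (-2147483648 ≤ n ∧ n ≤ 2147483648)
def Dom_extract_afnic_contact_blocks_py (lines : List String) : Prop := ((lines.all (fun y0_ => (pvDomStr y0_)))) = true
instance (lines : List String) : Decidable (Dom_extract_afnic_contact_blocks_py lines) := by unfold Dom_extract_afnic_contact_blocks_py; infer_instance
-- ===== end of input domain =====

-- B replaces A's index-driven nested while loops by a two-pass segment-then-parse pipeline; same cost, different decomposition.


-- ===== PORT A =====
-- inner 'while idx < total' loop of A: consumes lines until the block ends;
-- returns the accumulated attrs and the remaining lines (the new idx position)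
def pvAttrsA : List String → PySem.Dict String String → PySem.Dict String String × List String
  | [], attrs => (attrs, [])
  | current :: rest, attrs =>
    if current = "" then pvAttrsA rest attrs                -- 'if not current: continue'
    else if PySem.Str.startswith (PySem.Str.lower current) "nic-hdl:" then (attrs, current :: rest)
    else
      -- current.split(":", 1); sep ":" ≠ "" so splitMax? is always some
      let parts := (PySem.Str.splitMax? current ":" 1).getD []
      let attrs' := match parts with
        | [k, v] => attrs.setdefault (PySem.Str.lower (PySem.Str.strip k)) (PySem.Str.strip v)
        | _ => attrs
      if PySem.Str.startswith (PySem.Str.lower current) "source:" then (attrs', rest)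
      else pvAttrsA rest attrs'

theorem pvAttrsA_len : ∀ (rest : List String) (attrs : PySem.Dict String String),
    (pvAttrsA rest attrs).2.length ≤ rest.length := by
  intro rest
  induction rest with
  | nil => intro attrs; simp [pvAttrsA]
  | cons l rest ih =>
    intro attrs
    simp only [pvAttrsA]
    split_ifs <;> simp <;> exact Nat.le_succ_of_le (ih _)

-- outer 'while idx < total' loop of A
def pvLoopA : List String → PySem.Dict String (PySem.Dict String String) → PySem.Dict String (PySem.Dict String String)
  | [], blocks => blocks
  | line :: rest, blocks =>
    if PySem.Str.startswith (PySem.Str.lower line) "nic-hdl:" then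
      -- line.split(":", 1)[1].strip(); index 1 always exists here since the line starts with "nic-hdl:" so contains ':'
      let handle := PySem.Str.strip (PySem.List.pyGetD ((PySem.Str.splitMax? line ":" 1).getD []) 1 "")
      let r := pvAttrsA rest PySem.Dict.empty
      pvLoopA r.2 (blocks.insert handle r.1)
    else pvLoopA rest blocks
termination_by l _ => l.length
decreasing_by
  · exact Nat.lt_succ_of_le (pvAttrsA_len rest PySem.Dict.empty)
  · simp

def extract_afnic_contact_blocks_py (lines : List String) : List (String × List (String × String)) :=
  (pvLoopA lines PySem.Dict.empty).items.map (fun p => (p.1, p.2.items))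

-- ===== PORT B =====
-- Source B pass 1: fold state = (finished segments, open segment or none)
def pvFlushB (done : List (String × List String)) : Option (String × List String) → List (String × List String)
  | none => done
  | some seg => done ++ [seg]

def pvStep1B (st : List (String × List String) × Option (String × List String)) (line : String) :
    List (String × List String) × Option (String × List String) :=
  let low := PySem.Str.lower line
  if PySem.Str.startswith low "nic-hdl:" then
    (pvFlushB st.1 st.2,
     some (PySem.Str.strip (PySem.List.pyGetD ((PySem.Str.splitMax? line ":" 1).getD []) 1 ""), []))
  else
    match st.2 with
    | none => st
    | some hb =>
      let body' := hb.2 ++ [line]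
      if PySem.Str.startswith low "source:" then (st.1 ++ [(hb.1, body')], none)
      else (st.1, some (hb.1, body'))

def pvSegsB (lines : List String) : List (String × List String) :=
  let st := lines.foldl pvStep1B ([], none)
  pvFlushB st.1 st.2

-- Source B pass 2 inner loop body: one raw body line into attrs
def pvAttrStepB (attrs : PySem.Dict String String) (raw : String) : PySem.Dict String String :=
  match (PySem.Str.splitMax? raw ":" 1).getD [] with
  | [k, v] => attrs.setdefault (PySem.Str.lower (PySem.Str.strip k)) (PySem.Str.strip v)
  | _ => attrs

-- Source B pass 2 outer loop body: one segment into blocks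
def pvSegStepB (blocks : PySem.Dict String (PySem.Dict String String)) (seg : String × List String) :
    PySem.Dict String (PySem.Dict String String) :=
  blocks.insert seg.1 (seg.2.foldl pvAttrStepB PySem.Dict.empty)

def extract_afnic_contact_blocks_py_alt (lines : List String) : List (String × List (String × String)) :=
  ((pvSegsB lines).foldl pvSegStepB PySem.Dict.empty).items.map (fun p => (p.1, p.2.items))

-- ===== PRECONDITION & SPEC =====
def Spec_extract_afnic_contact_blocks_py (lines : List String) (out : List (String × List (String × String))) : Prop := out = extract_afnic_contact_blocks_py_alt lines
instance (lines : List String) (out : List (String × List (String × String))) : Decidable (Spec_extract_afnic_contact_blocks_py lines out) := by unfold Spec_extract_afnic_contact_blocks_py; infer_instance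

-- ===== CLAIM (what is proved, stated in full; the proofs are below) =====
def Claim_equal_extract_afnic_contact_blocks_py : Prop := ∀ (lines : List String), Dom_extract_afnic_contact_blocks_py lines → Spec_extract_afnic_contact_blocks_py lines (extract_afnic_contact_blocks_py lines)

-- ===== LEMMAS AND PROOFS =====

-- proof-side: (body of the block opened just before these lines, remaining lines after the block)
def pvCollect : List String → List String × List String
  | [] => ([], [])
  | l :: rest =>
    if PySem.Str.startswith (PySem.Str.lower l) "nic-hdl:" then ([], l :: rest)
    else if PySem.Str.startswith (PySem.Str.lower l) "source:" then ([l], rest)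
    else (l :: (pvCollect rest).1, (pvCollect rest).2)

theorem pvCollect_len : ∀ rest : List String, (pvCollect rest).2.length ≤ rest.length := by
  intro rest
  induction rest with
  | nil => simp [pvCollect]
  | cons l rest ih => simp only [pvCollect]; split_ifs <;> simp; omega

theorem pvAttrStepB_blank (attrs : PySem.Dict String String) : pvAttrStepB attrs "" = attrs := by
  have h : (PySem.Str.splitMax? "" ":" 1).getD [] = [""] := by decide
  simp [pvAttrStepB, h]

-- A's inner loop = fold B's attr step over the collected body, leaving the collected remainder
theorem pvAttrsA_eq_collect : ∀ (rest : List String) (attrs : PySem.Dict String String),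
    pvAttrsA rest attrs = ((pvCollect rest).1.foldl pvAttrStepB attrs, (pvCollect rest).2) := by
  intro rest
  induction rest with
  | nil => intro attrs; simp [pvAttrsA, pvCollect]
  | cons l rest ih =>
    intro attrs
    by_cases hblank : l = ""
    · subst hblank
      have hA : pvAttrsA ("" :: rest) attrs = pvAttrsA rest attrs := by
        simp only [pvAttrsA]; simp
      have hC : pvCollect ("" :: rest) = ("" :: (pvCollect rest).1, (pvCollect rest).2) := by
        simp only [pvCollect]; rw [if_neg (by decide), if_neg (by decide)]
      rw [hA, hC, ih]
      simp only [List.foldl_cons, pvAttrStepB_blank]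
    · by_cases hh : PySem.Str.startswith (PySem.Str.lower l) "nic-hdl:" = true
      · have hA : pvAttrsA (l :: rest) attrs = (attrs, l :: rest) := by
          simp only [pvAttrsA]; rw [if_neg hblank, if_pos hh]
        have hC : pvCollect (l :: rest) = ([], l :: rest) := by
          simp only [pvCollect]; rw [if_pos hh]
        rw [hA, hC]; simp
      · by_cases hs : PySem.Str.startswith (PySem.Str.lower l) "source:" = true
        · have hA : pvAttrsA (l :: rest) attrs = (pvAttrStepB attrs l, rest) := by
            simp only [pvAttrsA]; rw [if_neg hblank, if_pos hs, if_neg hh]; rfl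
          have hC : pvCollect (l :: rest) = ([l], rest) := by
            simp only [pvCollect]; rw [if_neg hh, if_pos hs]
          rw [hA, hC]; simp
        · have hA : pvAttrsA (l :: rest) attrs = pvAttrsA rest (pvAttrStepB attrs l) := by
            simp only [pvAttrsA]; rw [if_neg hblank, if_neg hs, if_neg hh]; rfl
          have hC : pvCollect (l :: rest) = (l :: (pvCollect rest).1, (pvCollect rest).2) := by
            simp only [pvCollect]; rw [if_neg hh, if_neg hs]
          rw [hA, hC, ih]
          simp only [List.foldl_cons]

def pvSegsFrom (st : List (String × List String) × Option (String × List String)) (rest : List String) :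
    List (String × List String) :=
  let st' := rest.foldl pvStep1B st
  pvFlushB st'.1 st'.2

theorem pvSegsFrom_cons (st : List (String × List String) × Option (String × List String))
    (l : String) (rest : List String) :
    pvSegsFrom st (l :: rest) = pvSegsFrom (pvStep1B st l) rest := by
  simp only [pvSegsFrom, List.foldl_cons]

-- each step only appends to the done-list
theorem pvStep1B_shift (done : List (String × List String)) (cur : Option (String × List String)) (l : String) :
    pvStep1B (done, cur) l = (done ++ (pvStep1B ([], cur) l).1, (pvStep1B ([], cur) l).2) := by
  cases cur with
  | none => simp only [pvStep1B, pvFlushB]; split_ifs <;> simp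
  | some hb => simp only [pvStep1B, pvFlushB]; split_ifs <;> simp

theorem pvSegsFrom_shift : ∀ (rest : List String) (done : List (String × List String))
    (cur : Option (String × List String)),
    pvSegsFrom (done, cur) rest = done ++ pvSegsFrom ([], cur) rest := by
  intro rest
  induction rest with
  | nil => intro done cur; cases cur <;> simp [pvSegsFrom, pvFlushB]
  | cons l rest ih =>
    intro done cur
    rw [pvSegsFrom_cons, pvSegsFrom_cons ([], cur)]
    rw [pvStep1B_shift]
    rw [ih, ih ((pvStep1B ([], cur) l).1)]
    simp

-- an open segment absorbs exactly the collected body; then the state is closed at the collected remainder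
theorem pvSegsFrom_open : ∀ (rest : List String) (done : List (String × List String)) (h : String)
    (body : List String),
    pvSegsFrom (done, some (h, body)) rest
      = pvSegsFrom (done ++ [(h, body ++ (pvCollect rest).1)], none) (pvCollect rest).2 := by
  intro rest
  induction rest with
  | nil => intro done h body; simp [pvSegsFrom, pvCollect, pvFlushB]
  | cons l rest ih =>
    intro done h body
    by_cases hh : PySem.Str.startswith (PySem.Str.lower l) "nic-hdl:" = true
    · have hC : pvCollect (l :: rest) = ([], l :: rest) := by
        simp only [pvCollect]; rw [if_pos hh]
      rw [hC]
      rw [pvSegsFrom_cons, pvSegsFrom_cons (done ++ [(h, body ++ [])], none)]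
      have hstep : pvStep1B (done, some (h, body)) l = pvStep1B (done ++ [(h, body ++ [])], none) l := by
        simp only [pvStep1B, pvFlushB]
        rw [if_pos hh, if_pos hh]
        simp
      rw [hstep]
    · by_cases hs : PySem.Str.startswith (PySem.Str.lower l) "source:" = true
      · have hC : pvCollect (l :: rest) = ([l], rest) := by
          simp only [pvCollect]; rw [if_neg hh, if_pos hs]
        rw [hC]
        rw [pvSegsFrom_cons]
        have hstep : pvStep1B (done, some (h, body)) l = (done ++ [(h, body ++ [l])], none) := by
          simp only [pvStep1B, pvFlushB]
          rw [if_neg hh, if_pos hs]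
        rw [hstep]
      · have hC : pvCollect (l :: rest) = (l :: (pvCollect rest).1, (pvCollect rest).2) := by
          simp only [pvCollect]; rw [if_neg hh, if_neg hs]
        rw [hC]
        rw [pvSegsFrom_cons]
        have hstep : pvStep1B (done, some (h, body)) l = (done, some (h, body ++ [l])) := by
          simp only [pvStep1B, pvFlushB]
          rw [if_neg hh, if_neg hs]
        rw [hstep, ih]
        simp

-- A's outer loop = B's second pass folded over B's first pass
theorem pvMain : ∀ (n : Nat) (rest : List String) (blocks : PySem.Dict String (PySem.Dict String String)),
    rest.length ≤ n →
    pvLoopA rest blocks = (pvSegsFrom ([], none) rest).foldl pvSegStepB blocks := by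
  intro n
  induction n with
  | zero =>
    intro rest blocks hlen
    have : rest = [] := List.eq_nil_of_length_eq_zero (Nat.le_zero.mp hlen)
    subst this
    simp [pvLoopA, pvSegsFrom, pvFlushB]
  | succ n ih =>
    intro rest blocks hlen
    cases rest with
    | nil => simp [pvLoopA, pvSegsFrom, pvFlushB]
    | cons l rest =>
      by_cases hh : PySem.Str.startswith (PySem.Str.lower l) "nic-hdl:" = true
      · have hA : pvLoopA (l :: rest) blocks
            = pvLoopA (pvCollect rest).2
                (blocks.insert
                  (PySem.Str.strip (PySem.List.pyGetD ((PySem.Str.splitMax? l ":" 1).getD []) 1 ""))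
                  ((pvCollect rest).1.foldl pvAttrStepB PySem.Dict.empty)) := by
          rw [pvLoopA]
          rw [if_pos hh]
          simp only [pvAttrsA_eq_collect]
        rw [hA, ih _ _ (le_trans (pvCollect_len rest) (Nat.le_of_succ_le_succ hlen))]
        have hB : pvSegsFrom ([], none) (l :: rest)
            = (PySem.Str.strip (PySem.List.pyGetD ((PySem.Str.splitMax? l ":" 1).getD []) 1 ""),
                (pvCollect rest).1) :: pvSegsFrom ([], none) (pvCollect rest).2 := by
          rw [pvSegsFrom_cons]
          have hstep : pvStep1B ([], none) l
              = ([], some (PySem.Str.strip (PySem.List.pyGetD ((PySem.Str.splitMax? l ":" 1).getD []) 1 ""), [])) := by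
            simp only [pvStep1B, pvFlushB]
            rw [if_pos hh]
          rw [hstep, pvSegsFrom_open, pvSegsFrom_shift]
          simp
        rw [hB]
        simp only [List.foldl_cons, pvSegStepB]
      · have hA : pvLoopA (l :: rest) blocks = pvLoopA rest blocks := by
          rw [pvLoopA]
          rw [if_neg hh]
        have hB : pvSegsFrom ([], none) (l :: rest) = pvSegsFrom ([], none) rest := by
          rw [pvSegsFrom_cons]
          have hstep : pvStep1B ([], none) l = ([], none) := by
            simp only [pvStep1B]
            rw [if_neg hh]
          rw [hstep]
        rw [hA, hB, ih _ _ (Nat.le_of_succ_le_succ (by simpa using hlen))]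

-- ===== VERDICT (by name: the statement is the Claim_ definition above) =====
theorem extract_afnic_contact_blocks_py_spec : Claim_equal_extract_afnic_contact_blocks_py := by
  intro lines _
  show extract_afnic_contact_blocks_py lines = extract_afnic_contact_blocks_py_alt lines
  unfold extract_afnic_contact_blocks_py extract_afnic_contact_blocks_py_alt
  rw [pvMain lines.length lines PySem.Dict.empty (le_refl _)]
  rfl
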